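-- pv_equiv track=rewrite | github.com/DipanjanKuila/Chatbot_with_memory | chatbot.py | get_first_messages
-- ===== SOURCE A (Python) =====
-- def get_first_messages(chat_history):
--     human_message = None
--     ai_message = None
--
--     for role, content in chat_history:
--         if role == "human" and human_message is None:
--             human_message = content
--         elif role == "ai" and human_message is not None and ai_message is None:
--             ai_message = content
--
--         if human_message and ai_message:
--             break
--
--     return human_message, ai_message
-- ===== SOURCE B (Python) =====
-- def get_first_messages(chat_history):
--     # One backwards pass over the history, maintaining for the suffix already
--     # processed: its first human message, the first ai message after that human,
--     # and its first ai message overall.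
--     human_message = ai_message = first_ai = None
--     for role, content in reversed(list(chat_history)):
--         if role == "human":
--             human_message = content
--             ai_message = first_ai
--         if role == "ai":
--             first_ai = content
--     return human_message, ai_message
-- ===== Notes on version B (the rewrite author's own statement) =====
-- stated objective: alternative
-- what changed: Replaces A's forward state-machine with guarded slots and an early break by a single backwards (right-to-left) pass that carries the suffix invariant 'first ai message of the suffix', so the answer pair is rebuilt from the right instead of filled in from the left.
import Mathlib
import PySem

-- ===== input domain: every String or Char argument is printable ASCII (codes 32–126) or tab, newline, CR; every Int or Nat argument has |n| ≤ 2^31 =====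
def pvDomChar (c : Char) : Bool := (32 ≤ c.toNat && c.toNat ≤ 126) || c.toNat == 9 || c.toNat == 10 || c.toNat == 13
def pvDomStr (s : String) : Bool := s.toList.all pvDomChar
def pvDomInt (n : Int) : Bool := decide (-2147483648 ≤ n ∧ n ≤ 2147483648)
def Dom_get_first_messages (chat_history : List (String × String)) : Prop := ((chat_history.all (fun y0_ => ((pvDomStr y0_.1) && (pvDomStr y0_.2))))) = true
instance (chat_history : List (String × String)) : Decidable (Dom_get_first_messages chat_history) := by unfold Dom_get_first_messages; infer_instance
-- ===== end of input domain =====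

-- B replaces A's forward state-machine (guarded slots + early break) by one backwards pass carrying the suffix's first ai message; same values everywhere.

-- ===== PORT A =====
-- Python truthiness of an Optional[str]: None and "" are falsy
def pvTruthy (o : Option String) : Bool :=
  match o with
  | none => false
  | some s => s ≠ ""

-- the for-loop with its early break, state = (human_message, ai_message)
def aLoop : List (String × String) → Option String → Option String → Option String × Option String
  | [], h, a => (h, a)
  | (role, content) :: rest, h, a =>
    let h' := if role = "human" ∧ h = none then some content else h
    let a' := if ¬ (role = "human" ∧ h = none) ∧ role = "ai" ∧ h ≠ none ∧ a = none
              then some content else a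
    if pvTruthy h' ∧ pvTruthy a' then (h', a') else aLoop rest h' a'

def get_first_messages (chat_history : List (String × String)) : Option String × Option String :=
  aLoop chat_history none none

-- ===== PORT B =====
-- one step of the backwards loop; state = (human_message, ai_message, first_ai)
def bStep (p : String × String) (acc : Option String × Option String × Option String) :
    Option String × Option String × Option String :=
  let (role, content) := p
  let (h, a, fa) := acc
  let h := if role = "human" then some content else h
  let a := if role = "human" then fa else a
  let fa := if role = "ai" then some content else fa
  (h, a, fa)

-- 'for … in reversed(list(chat_history))' with a running state is a right fold
def get_first_messages_alt (chat_history : List (String × String)) : Option String × Option String :=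
  let t := chat_history.foldr bStep (none, none, none)
  (t.1, t.2.1)

-- ===== PRECONDITION & SPEC =====
def Spec_get_first_messages (chat_history : List (String × String)) (out : Option String × Option String) : Prop := out = get_first_messages_alt chat_history
instance (chat_history : List (String × String)) (out : Option String × Option String) : Decidable (Spec_get_first_messages chat_history out) := by unfold Spec_get_first_messages; infer_instance

-- ===== CLAIM (what is proved, stated in full; the proofs are below) =====
def Claim_equal_get_first_messages : Prop := ∀ (chat_history : List (String × String)), Dom_get_first_messages chat_history → Spec_get_first_messages chat_history (get_first_messages chat_history)

-- ===== LEMMAS AND PROOFS =====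

-- once both slots are filled, A's loop changes nothing
theorem aLoop_full (xs : List (String × String)) (c a : String) :
    aLoop xs (some c) (some a) = (some c, some a) := by
  induction xs with
  | nil => rfl
  | cons p rest ih =>
    obtain ⟨r, x⟩ := p
    simp only [aLoop]
    split_ifs <;> simp_all

-- after the human slot is filled, A's loop just finds the first ai message
theorem aLoop_human (xs : List (String × String)) (c : String) :
    aLoop xs (some c) none = (some c, (xs.find? (fun p => p.1 == "ai")).map Prod.snd) := by
  induction xs with
  | nil => rfl
  | cons p rest ih =>
    obtain ⟨r, x⟩ := p
    simp only [aLoop]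
    by_cases hr : r = "ai"
    · subst hr
      simp only [List.find?]
      split_ifs with h <;> simp_all [aLoop_full, pvTruthy]
    · have hb : (r == "ai") = false := by simp [hr]
      simp only [List.find?, hb]
      split_ifs with h <;> simp_all [pvTruthy]

-- the backwards fold against A's loop: its third component is the first ai of the list
theorem aLoop_eq_foldr (xs : List (String × String)) :
    aLoop xs none none =
      ((xs.foldr bStep (none, none, none)).1, (xs.foldr bStep (none, none, none)).2.1) ∧
    (xs.foldr bStep (none, none, none)).2.2 = (xs.find? (fun p => p.1 == "ai")).map Prod.snd := by
  induction xs with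
  | nil => exact ⟨rfl, rfl⟩
  | cons p rest ih =>
    obtain ⟨r, x⟩ := p
    obtain ⟨ih1, ih2⟩ := ih
    simp only [List.foldr, bStep, aLoop]
    by_cases hr : r = "human"
    · subst hr
      constructor
      · simp [pvTruthy, aLoop_human, ← ih2]
      · simp [List.find?, ← ih2]
    · by_cases ha : r = "ai"
      · subst ha
        constructor
        · simp only [show ("ai" : String) = "human" ↔ False by simp, if_false,
            false_and, if_false, pvTruthy]
          simpa using ih1
        · simp [List.find?]
      · have hb : (r == "ai") = false := by simp [ha]
        constructor
        · simp only [hr, if_false, false_and, if_false, ne_eq,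
            not_false_eq_true, pvTruthy]
          simpa [hr, ha] using ih1
        · simp [List.find?, hb, ih2, ha]

-- ===== VERDICT (by name: the statement is the Claim_ definition above) =====
theorem get_first_messages_spec : Claim_equal_get_first_messages := by
  intro ch _
  unfold Spec_get_first_messages get_first_messages get_first_messages_alt
  exact (aLoop_eq_foldr ch).1
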